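-- pv_equiv track=rewrite | github.com/wilmurillo-ai/Design-Assistant | .skills/openclaw-skills/skills/clhwbd/go-stargazing/scripts/go_stargazing_engine/engine.py | _night_weather_summary
-- ===== SOURCE A (Python) =====
-- from typing import Dict, List, Optional, Tuple
--
-- def _night_weather_summary(codes: Optional[List[int]]) -> Optional[str]:
--     if not codes:
--         return None
--     first = next((c for c in codes if c is not None), None)
--     if first is None:
--         return None
--     if first == 0:
--         return "晴"
--     if first in {1, 2, 3}:
--         return "少云到多云"
--     if first in {45, 48}:
--         return "有雾风险"
--     if first in {51, 53, 55, 56, 57, 61, 63, 65, 66, 67, 80, 81, 82}: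
--         return "有降水信号"
--     if first in {71, 73, 75, 77, 85, 86}:
--         return "有降雪信号"
--     if first in {95, 96, 99}:
--         return "有雷暴风险"
--     return f"天气码 {first}"
-- ===== SOURCE B (Python) =====
-- from typing import Dict, List, Optional, Tuple
--
-- # Sorted, disjoint (lo, hi, label) interval table covering every special code.
-- _SEGS = [
--     (0, 0, "晴"), (1, 3, "少云到多云"),
--     (45, 45, "有雾风险"), (48, 48, "有雾风险"),
--     (51, 51, "有降水信号"), (53, 53, "有降水信号"), (55, 57, "有降水信号"),
--     (61, 61, "有降水信号"), (63, 63, "有降水信号"), (65, 67, "有降水信号"),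
--     (71, 71, "有降雪信号"), (73, 73, "有降雪信号"), (75, 75, "有降雪信号"),
--     (77, 77, "有降雪信号"), (80, 82, "有降水信号"), (85, 86, "有降雪信号"),
--     (95, 96, "有雷暴风险"), (99, 99, "有雷暴风险"),
-- ]
--
-- def _night_weather_summary(codes: Optional[List[int]]) -> Optional[str]:
--     if not codes:
--         return None
--     first = next((c for c in codes if c is not None), None)
--     if first is None:
--         return None
--     # binary search for the last segment whose lower bound is <= first
--     lo, hi = 0, len(_SEGS)
--     while lo < hi:
--         mid = (lo + hi) // 2
--         if _SEGS[mid][0] <= first: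
--             lo = mid + 1
--         else:
--             hi = mid
--     if lo > 0 and first <= _SEGS[lo - 1][1]:
--         return _SEGS[lo - 1][2]
--     return f"天气码 {first}"
-- ===== Notes on version B (the rewrite author's own statement) =====
-- stated objective: alternative
-- what changed: Replaced the six sequential set-membership if-branches by a hand-written binary search over a sorted table of disjoint (lo, hi, label) code intervals, with the f-string fallback when the code falls in no interval.
import Mathlib
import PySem

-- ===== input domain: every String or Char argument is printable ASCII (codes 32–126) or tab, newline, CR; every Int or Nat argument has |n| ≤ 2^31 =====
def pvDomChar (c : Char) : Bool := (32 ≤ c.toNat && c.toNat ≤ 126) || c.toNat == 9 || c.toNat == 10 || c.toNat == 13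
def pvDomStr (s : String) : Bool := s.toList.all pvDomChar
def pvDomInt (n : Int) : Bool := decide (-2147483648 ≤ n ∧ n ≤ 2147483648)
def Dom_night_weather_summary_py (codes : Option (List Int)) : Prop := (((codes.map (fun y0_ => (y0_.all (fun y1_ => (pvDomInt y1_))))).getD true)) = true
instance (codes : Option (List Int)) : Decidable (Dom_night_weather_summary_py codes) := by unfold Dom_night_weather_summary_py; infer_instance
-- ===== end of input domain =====

-- B replaces A's six sequential set-membership branches by a binary search over a sorted
-- disjoint interval table (objective: alternative); same return value on every input.

-- ===== PORT A =====
-- 'first = next((c for c in codes if c is not None), None)': elements are Int, so this is the head.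
def night_weather_summary_py (codes : Option (List Int)) : Option String :=
  match codes with
  | none => none
  | some l =>
    if l = [] then none
    else
      match l.head? with
      | none => none
      | some first =>
        if first = 0 then some "晴"
        else if first ∈ [(1:Int), 2, 3] then some "少云到多云"
        else if first ∈ [(45:Int), 48] then some "有雾风险"
        else if first ∈ [(51:Int), 53, 55, 56, 57, 61, 63, 65, 66, 67, 80, 81, 82] then some "有降水信号"
        else if first ∈ [(71:Int), 73, 75, 77, 85, 86] then some "有降雪信号"
        else if first ∈ [(95:Int), 96, 99] then some "有雷暴风险"
        else some ("天气码 " ++ PySem.Int.toStr first)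

-- ===== PORT B =====
-- sorted, disjoint (lo, hi, label) interval table covering every special code
def pvSegs : List (Int × Int × String) := [
  (0, 0, "晴"), (1, 3, "少云到多云"),
  (45, 45, "有雾风险"), (48, 48, "有雾风险"),
  (51, 51, "有降水信号"), (53, 53, "有降水信号"), (55, 57, "有降水信号"),
  (61, 61, "有降水信号"), (63, 63, "有降水信号"), (65, 67, "有降水信号"),
  (71, 71, "有降雪信号"), (73, 73, "有降雪信号"), (75, 75, "有降雪信号"),
  (77, 77, "有降雪信号"), (80, 82, "有降水信号"), (85, 86, "有降雪信号"),
  (95, 96, "有雷暴风险"), (99, 99, "有雷暴风险")]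

-- the while-loop binary search of Source B, as fuel recursion (fuel = len(_SEGS) bounds the iterations)
def pvBisect (x : Int) : Nat → Nat → Nat → Nat
  | 0, lo, _ => lo
  | f + 1, lo, hi =>
    if lo < hi then
      let mid := (lo + hi) / 2
      if (pvSegs.getD mid (0, 0, "")).1 ≤ x then pvBisect x f (mid + 1) hi
      else pvBisect x f lo mid
    else lo

def night_weather_summary_py_alt (codes : Option (List Int)) : Option String :=
  match codes with
  | none => none
  | some l =>
    if l = [] then none
    else
      match l.head? with
      | none => none
      | some first =>
        let lo := pvBisect first 18 0 18
        if 0 < lo ∧ first ≤ (pvSegs.getD (lo - 1) (0, 0, "")).2.1 then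
          some (pvSegs.getD (lo - 1) (0, 0, "")).2.2
        else some ("天气码 " ++ PySem.Int.toStr first)

-- ===== PRECONDITION & SPEC =====
def Spec_night_weather_summary_py (codes : Option (List Int)) (out : Option String) : Prop := out = night_weather_summary_py_alt codes
instance (codes : Option (List Int)) (out : Option String) : Decidable (Spec_night_weather_summary_py codes out) := by unfold Spec_night_weather_summary_py; infer_instance

-- ===== CLAIM (what is proved, stated in full; the proofs are below) =====
def Claim_equal_night_weather_summary_py : Prop := ∀ (codes : Option (List Int)), Dom_night_weather_summary_py codes → Spec_night_weather_summary_py codes (night_weather_summary_py codes)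

-- ===== LEMMAS AND PROOFS =====
lemma pvRank (n : Int) : n < 0 ∨ (0 ≤ n ∧ n < 1) ∨ (1 ≤ n ∧ n < 45) ∨ (45 ≤ n ∧ n < 48) ∨ (48 ≤ n ∧ n < 51) ∨ (51 ≤ n ∧ n < 53) ∨ (53 ≤ n ∧ n < 55) ∨ (55 ≤ n ∧ n < 61) ∨ (61 ≤ n ∧ n < 63) ∨ (63 ≤ n ∧ n < 65) ∨ (65 ≤ n ∧ n < 71) ∨ (71 ≤ n ∧ n < 73) ∨ (73 ≤ n ∧ n < 75) ∨ (75 ≤ n ∧ n < 77) ∨ (77 ≤ n ∧ n < 80) ∨ (80 ≤ n ∧ n < 85) ∨ (85 ≤ n ∧ n < 95) ∨ (95 ≤ n ∧ n < 99) ∨ 99 ≤ n := by omega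

lemma pvBis_0 (n : Int) (h1 : n < 0) : pvBisect n 18 0 18 = 0 := by
  rw [show (18:Nat) = 17+1 from rfl, pvBisect]
  norm_num [pvSegs, show ¬((65:Int) ≤ n) by omega]
  rw [show (17:Nat) = 16+1 from rfl, pvBisect]
  norm_num [pvSegs, show ¬((51:Int) ≤ n) by omega]
  rw [show (16:Nat) = 15+1 from rfl, pvBisect]
  norm_num [pvSegs, show ¬((45:Int) ≤ n) by omega]
  rw [show (15:Nat) = 14+1 from rfl, pvBisect]
  norm_num [pvSegs, show ¬((1:Int) ≤ n) by omega]
  rw [show (14:Nat) = 13+1 from rfl, pvBisect]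
  norm_num [pvSegs, show ¬((0:Int) ≤ n) by omega]
  rw [show (13:Nat) = 12+1 from rfl, pvBisect]
  norm_num

lemma pvBis_1 (n : Int) (h1 : 0 ≤ n) (h2 : n < 1) : pvBisect n 18 0 18 = 1 := by
  rw [show (18:Nat) = 17+1 from rfl, pvBisect]
  norm_num [pvSegs, show ¬((65:Int) ≤ n) by omega]
  rw [show (17:Nat) = 16+1 from rfl, pvBisect]
  norm_num [pvSegs, show ¬((51:Int) ≤ n) by omega]
  rw [show (16:Nat) = 15+1 from rfl, pvBisect]
  norm_num [pvSegs, show ¬((45:Int) ≤ n) by omega]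
  rw [show (15:Nat) = 14+1 from rfl, pvBisect]
  norm_num [pvSegs, show ¬((1:Int) ≤ n) by omega]
  rw [show (14:Nat) = 13+1 from rfl, pvBisect]
  norm_num [pvSegs, show (0:Int) ≤ n by omega]
  rw [show (13:Nat) = 12+1 from rfl, pvBisect]
  norm_num

lemma pvBis_2 (n : Int) (h1 : 1 ≤ n) (h2 : n < 45) : pvBisect n 18 0 18 = 2 := by
  rw [show (18:Nat) = 17+1 from rfl, pvBisect]
  norm_num [pvSegs, show ¬((65:Int) ≤ n) by omega]
  rw [show (17:Nat) = 16+1 from rfl, pvBisect]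
  norm_num [pvSegs, show ¬((51:Int) ≤ n) by omega]
  rw [show (16:Nat) = 15+1 from rfl, pvBisect]
  norm_num [pvSegs, show ¬((45:Int) ≤ n) by omega]
  rw [show (15:Nat) = 14+1 from rfl, pvBisect]
  norm_num [pvSegs, show (1:Int) ≤ n by omega]
  rw [show (14:Nat) = 13+1 from rfl, pvBisect]
  norm_num

lemma pvBis_3 (n : Int) (h1 : 45 ≤ n) (h2 : n < 48) : pvBisect n 18 0 18 = 3 := by
  rw [show (18:Nat) = 17+1 from rfl, pvBisect]
  norm_num [pvSegs, show ¬((65:Int) ≤ n) by omega]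
  rw [show (17:Nat) = 16+1 from rfl, pvBisect]
  norm_num [pvSegs, show ¬((51:Int) ≤ n) by omega]
  rw [show (16:Nat) = 15+1 from rfl, pvBisect]
  norm_num [pvSegs, show (45:Int) ≤ n by omega]
  rw [show (15:Nat) = 14+1 from rfl, pvBisect]
  norm_num [pvSegs, show ¬((48:Int) ≤ n) by omega]
  rw [show (14:Nat) = 13+1 from rfl, pvBisect]
  norm_num

lemma pvBis_4 (n : Int) (h1 : 48 ≤ n) (h2 : n < 51) : pvBisect n 18 0 18 = 4 := by
  rw [show (18:Nat) = 17+1 from rfl, pvBisect]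
  norm_num [pvSegs, show ¬((65:Int) ≤ n) by omega]
  rw [show (17:Nat) = 16+1 from rfl, pvBisect]
  norm_num [pvSegs, show ¬((51:Int) ≤ n) by omega]
  rw [show (16:Nat) = 15+1 from rfl, pvBisect]
  norm_num [pvSegs, show (45:Int) ≤ n by omega]
  rw [show (15:Nat) = 14+1 from rfl, pvBisect]
  norm_num [pvSegs, show (48:Int) ≤ n by omega]
  rw [show (14:Nat) = 13+1 from rfl, pvBisect]
  norm_num

lemma pvBis_5 (n : Int) (h1 : 51 ≤ n) (h2 : n < 53) : pvBisect n 18 0 18 = 5 := by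
  rw [show (18:Nat) = 17+1 from rfl, pvBisect]
  norm_num [pvSegs, show ¬((65:Int) ≤ n) by omega]
  rw [show (17:Nat) = 16+1 from rfl, pvBisect]
  norm_num [pvSegs, show (51:Int) ≤ n by omega]
  rw [show (16:Nat) = 15+1 from rfl, pvBisect]
  norm_num [pvSegs, show ¬((61:Int) ≤ n) by omega]
  rw [show (15:Nat) = 14+1 from rfl, pvBisect]
  norm_num [pvSegs, show ¬((55:Int) ≤ n) by omega]
  rw [show (14:Nat) = 13+1 from rfl, pvBisect]
  norm_num [pvSegs, show ¬((53:Int) ≤ n) by omega]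
  rw [show (13:Nat) = 12+1 from rfl, pvBisect]
  norm_num

lemma pvBis_6 (n : Int) (h1 : 53 ≤ n) (h2 : n < 55) : pvBisect n 18 0 18 = 6 := by
  rw [show (18:Nat) = 17+1 from rfl, pvBisect]
  norm_num [pvSegs, show ¬((65:Int) ≤ n) by omega]
  rw [show (17:Nat) = 16+1 from rfl, pvBisect]
  norm_num [pvSegs, show (51:Int) ≤ n by omega]
  rw [show (16:Nat) = 15+1 from rfl, pvBisect]
  norm_num [pvSegs, show ¬((61:Int) ≤ n) by omega]
  rw [show (15:Nat) = 14+1 from rfl, pvBisect]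
  norm_num [pvSegs, show ¬((55:Int) ≤ n) by omega]
  rw [show (14:Nat) = 13+1 from rfl, pvBisect]
  norm_num [pvSegs, show (53:Int) ≤ n by omega]
  rw [show (13:Nat) = 12+1 from rfl, pvBisect]
  norm_num

lemma pvBis_7 (n : Int) (h1 : 55 ≤ n) (h2 : n < 61) : pvBisect n 18 0 18 = 7 := by
  rw [show (18:Nat) = 17+1 from rfl, pvBisect]
  norm_num [pvSegs, show ¬((65:Int) ≤ n) by omega]
  rw [show (17:Nat) = 16+1 from rfl, pvBisect]
  norm_num [pvSegs, show (51:Int) ≤ n by omega]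
  rw [show (16:Nat) = 15+1 from rfl, pvBisect]
  norm_num [pvSegs, show ¬((61:Int) ≤ n) by omega]
  rw [show (15:Nat) = 14+1 from rfl, pvBisect]
  norm_num [pvSegs, show (55:Int) ≤ n by omega]
  rw [show (14:Nat) = 13+1 from rfl, pvBisect]
  norm_num

lemma pvBis_8 (n : Int) (h1 : 61 ≤ n) (h2 : n < 63) : pvBisect n 18 0 18 = 8 := by
  rw [show (18:Nat) = 17+1 from rfl, pvBisect]
  norm_num [pvSegs, show ¬((65:Int) ≤ n) by omega]
  rw [show (17:Nat) = 16+1 from rfl, pvBisect]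
  norm_num [pvSegs, show (51:Int) ≤ n by omega]
  rw [show (16:Nat) = 15+1 from rfl, pvBisect]
  norm_num [pvSegs, show (61:Int) ≤ n by omega]
  rw [show (15:Nat) = 14+1 from rfl, pvBisect]
  norm_num [pvSegs, show ¬((63:Int) ≤ n) by omega]
  rw [show (14:Nat) = 13+1 from rfl, pvBisect]
  norm_num

lemma pvBis_9 (n : Int) (h1 : 63 ≤ n) (h2 : n < 65) : pvBisect n 18 0 18 = 9 := by
  rw [show (18:Nat) = 17+1 from rfl, pvBisect]
  norm_num [pvSegs, show ¬((65:Int) ≤ n) by omega]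
  rw [show (17:Nat) = 16+1 from rfl, pvBisect]
  norm_num [pvSegs, show (51:Int) ≤ n by omega]
  rw [show (16:Nat) = 15+1 from rfl, pvBisect]
  norm_num [pvSegs, show (61:Int) ≤ n by omega]
  rw [show (15:Nat) = 14+1 from rfl, pvBisect]
  norm_num [pvSegs, show (63:Int) ≤ n by omega]
  rw [show (14:Nat) = 13+1 from rfl, pvBisect]
  norm_num

lemma pvBis_10 (n : Int) (h1 : 65 ≤ n) (h2 : n < 71) : pvBisect n 18 0 18 = 10 := by
  rw [show (18:Nat) = 17+1 from rfl, pvBisect]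
  norm_num [pvSegs, show (65:Int) ≤ n by omega]
  rw [show (17:Nat) = 16+1 from rfl, pvBisect]
  norm_num [pvSegs, show ¬((80:Int) ≤ n) by omega]
  rw [show (16:Nat) = 15+1 from rfl, pvBisect]
  norm_num [pvSegs, show ¬((75:Int) ≤ n) by omega]
  rw [show (15:Nat) = 14+1 from rfl, pvBisect]
  norm_num [pvSegs, show ¬((73:Int) ≤ n) by omega]
  rw [show (14:Nat) = 13+1 from rfl, pvBisect]
  norm_num [pvSegs, show ¬((71:Int) ≤ n) by omega]
  rw [show (13:Nat) = 12+1 from rfl, pvBisect]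
  norm_num

lemma pvBis_11 (n : Int) (h1 : 71 ≤ n) (h2 : n < 73) : pvBisect n 18 0 18 = 11 := by
  rw [show (18:Nat) = 17+1 from rfl, pvBisect]
  norm_num [pvSegs, show (65:Int) ≤ n by omega]
  rw [show (17:Nat) = 16+1 from rfl, pvBisect]
  norm_num [pvSegs, show ¬((80:Int) ≤ n) by omega]
  rw [show (16:Nat) = 15+1 from rfl, pvBisect]
  norm_num [pvSegs, show ¬((75:Int) ≤ n) by omega]
  rw [show (15:Nat) = 14+1 from rfl, pvBisect]
  norm_num [pvSegs, show ¬((73:Int) ≤ n) by omega]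
  rw [show (14:Nat) = 13+1 from rfl, pvBisect]
  norm_num [pvSegs, show (71:Int) ≤ n by omega]
  rw [show (13:Nat) = 12+1 from rfl, pvBisect]
  norm_num

lemma pvBis_12 (n : Int) (h1 : 73 ≤ n) (h2 : n < 75) : pvBisect n 18 0 18 = 12 := by
  rw [show (18:Nat) = 17+1 from rfl, pvBisect]
  norm_num [pvSegs, show (65:Int) ≤ n by omega]
  rw [show (17:Nat) = 16+1 from rfl, pvBisect]
  norm_num [pvSegs, show ¬((80:Int) ≤ n) by omega]
  rw [show (16:Nat) = 15+1 from rfl, pvBisect]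
  norm_num [pvSegs, show ¬((75:Int) ≤ n) by omega]
  rw [show (15:Nat) = 14+1 from rfl, pvBisect]
  norm_num [pvSegs, show (73:Int) ≤ n by omega]
  rw [show (14:Nat) = 13+1 from rfl, pvBisect]
  norm_num

lemma pvBis_13 (n : Int) (h1 : 75 ≤ n) (h2 : n < 77) : pvBisect n 18 0 18 = 13 := by
  rw [show (18:Nat) = 17+1 from rfl, pvBisect]
  norm_num [pvSegs, show (65:Int) ≤ n by omega]
  rw [show (17:Nat) = 16+1 from rfl, pvBisect]
  norm_num [pvSegs, show ¬((80:Int) ≤ n) by omega]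
  rw [show (16:Nat) = 15+1 from rfl, pvBisect]
  norm_num [pvSegs, show (75:Int) ≤ n by omega]
  rw [show (15:Nat) = 14+1 from rfl, pvBisect]
  norm_num [pvSegs, show ¬((77:Int) ≤ n) by omega]
  rw [show (14:Nat) = 13+1 from rfl, pvBisect]
  norm_num

lemma pvBis_14 (n : Int) (h1 : 77 ≤ n) (h2 : n < 80) : pvBisect n 18 0 18 = 14 := by
  rw [show (18:Nat) = 17+1 from rfl, pvBisect]
  norm_num [pvSegs, show (65:Int) ≤ n by omega]
  rw [show (17:Nat) = 16+1 from rfl, pvBisect]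
  norm_num [pvSegs, show ¬((80:Int) ≤ n) by omega]
  rw [show (16:Nat) = 15+1 from rfl, pvBisect]
  norm_num [pvSegs, show (75:Int) ≤ n by omega]
  rw [show (15:Nat) = 14+1 from rfl, pvBisect]
  norm_num [pvSegs, show (77:Int) ≤ n by omega]
  rw [show (14:Nat) = 13+1 from rfl, pvBisect]
  norm_num

lemma pvBis_15 (n : Int) (h1 : 80 ≤ n) (h2 : n < 85) : pvBisect n 18 0 18 = 15 := by
  rw [show (18:Nat) = 17+1 from rfl, pvBisect]
  norm_num [pvSegs, show (65:Int) ≤ n by omega]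
  rw [show (17:Nat) = 16+1 from rfl, pvBisect]
  norm_num [pvSegs, show (80:Int) ≤ n by omega]
  rw [show (16:Nat) = 15+1 from rfl, pvBisect]
  norm_num [pvSegs, show ¬((95:Int) ≤ n) by omega]
  rw [show (15:Nat) = 14+1 from rfl, pvBisect]
  norm_num [pvSegs, show ¬((85:Int) ≤ n) by omega]
  rw [show (14:Nat) = 13+1 from rfl, pvBisect]
  norm_num

lemma pvBis_16 (n : Int) (h1 : 85 ≤ n) (h2 : n < 95) : pvBisect n 18 0 18 = 16 := by
  rw [show (18:Nat) = 17+1 from rfl, pvBisect]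
  norm_num [pvSegs, show (65:Int) ≤ n by omega]
  rw [show (17:Nat) = 16+1 from rfl, pvBisect]
  norm_num [pvSegs, show (80:Int) ≤ n by omega]
  rw [show (16:Nat) = 15+1 from rfl, pvBisect]
  norm_num [pvSegs, show ¬((95:Int) ≤ n) by omega]
  rw [show (15:Nat) = 14+1 from rfl, pvBisect]
  norm_num [pvSegs, show (85:Int) ≤ n by omega]
  rw [show (14:Nat) = 13+1 from rfl, pvBisect]
  norm_num

lemma pvBis_17 (n : Int) (h1 : 95 ≤ n) (h2 : n < 99) : pvBisect n 18 0 18 = 17 := by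
  rw [show (18:Nat) = 17+1 from rfl, pvBisect]
  norm_num [pvSegs, show (65:Int) ≤ n by omega]
  rw [show (17:Nat) = 16+1 from rfl, pvBisect]
  norm_num [pvSegs, show (80:Int) ≤ n by omega]
  rw [show (16:Nat) = 15+1 from rfl, pvBisect]
  norm_num [pvSegs, show (95:Int) ≤ n by omega]
  rw [show (15:Nat) = 14+1 from rfl, pvBisect]
  norm_num [pvSegs, show ¬((99:Int) ≤ n) by omega]
  rw [show (14:Nat) = 13+1 from rfl, pvBisect]
  norm_num

lemma pvBis_18 (n : Int) (h1 : 99 ≤ n) : pvBisect n 18 0 18 = 18 := by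
  rw [show (18:Nat) = 17+1 from rfl, pvBisect]
  norm_num [pvSegs, show (65:Int) ≤ n by omega]
  rw [show (17:Nat) = 16+1 from rfl, pvBisect]
  norm_num [pvSegs, show (80:Int) ≤ n by omega]
  rw [show (16:Nat) = 15+1 from rfl, pvBisect]
  norm_num [pvSegs, show (95:Int) ≤ n by omega]
  rw [show (15:Nat) = 14+1 from rfl, pvBisect]
  norm_num [pvSegs, show (99:Int) ≤ n by omega]
  rw [show (14:Nat) = 13+1 from rfl, pvBisect]
  norm_num

set_option maxHeartbeats 4000000 in
lemma label_eq (n : Int) :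
    (if n = 0 then some "晴"
     else if n ∈ [(1:Int), 2, 3] then some "少云到多云"
     else if n ∈ [(45:Int), 48] then some "有雾风险"
     else if n ∈ [(51:Int), 53, 55, 56, 57, 61, 63, 65, 66, 67, 80, 81, 82] then some "有降水信号"
     else if n ∈ [(71:Int), 73, 75, 77, 85, 86] then some "有降雪信号"
     else if n ∈ [(95:Int), 96, 99] then some "有雷暴风险"
     else some ("天气码 " ++ PySem.Int.toStr n)) =
    (let lo := pvBisect n 18 0 18
     if 0 < lo ∧ n ≤ (pvSegs.getD (lo - 1) (0, 0, "")).2.1 then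
       some (pvSegs.getD (lo - 1) (0, 0, "")).2.2
     else some ("天气码 " ++ PySem.Int.toStr n)) := by
  rcases pvRank n with h0|h1|h2|h3|h4|h5|h6|h7|h8|h9|h10|h11|h12|h13|h14|h15|h16|h17|h18
  · rw [pvBis_0 n h0]
    norm_num [pvSegs, List.mem_cons]
    split_ifs <;> simp_all <;> omega
  · rw [pvBis_1 n h1.1 h1.2]
    norm_num [pvSegs, List.mem_cons]
    split_ifs <;> simp_all <;> omega
  · rw [pvBis_2 n h2.1 h2.2]
    norm_num [pvSegs, List.mem_cons]
    split_ifs <;> simp_all <;> omega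
  · rw [pvBis_3 n h3.1 h3.2]
    norm_num [pvSegs, List.mem_cons]
    split_ifs <;> simp_all <;> omega
  · rw [pvBis_4 n h4.1 h4.2]
    norm_num [pvSegs, List.mem_cons]
    split_ifs <;> simp_all <;> omega
  · rw [pvBis_5 n h5.1 h5.2]
    norm_num [pvSegs, List.mem_cons]
    split_ifs <;> simp_all <;> omega
  · rw [pvBis_6 n h6.1 h6.2]
    norm_num [pvSegs, List.mem_cons]
    split_ifs <;> simp_all <;> omega
  · rw [pvBis_7 n h7.1 h7.2]
    norm_num [pvSegs, List.mem_cons]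
    split_ifs <;> simp_all <;> omega
  · rw [pvBis_8 n h8.1 h8.2]
    norm_num [pvSegs, List.mem_cons]
    split_ifs <;> simp_all <;> omega
  · rw [pvBis_9 n h9.1 h9.2]
    norm_num [pvSegs, List.mem_cons]
    split_ifs <;> simp_all <;> omega
  · rw [pvBis_10 n h10.1 h10.2]
    norm_num [pvSegs, List.mem_cons]
    split_ifs <;> simp_all <;> omega
  · rw [pvBis_11 n h11.1 h11.2]
    norm_num [pvSegs, List.mem_cons]
    split_ifs <;> simp_all <;> omega
  · rw [pvBis_12 n h12.1 h12.2]
    norm_num [pvSegs, List.mem_cons]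
    split_ifs <;> simp_all <;> omega
  · rw [pvBis_13 n h13.1 h13.2]
    norm_num [pvSegs, List.mem_cons]
    split_ifs <;> simp_all <;> omega
  · rw [pvBis_14 n h14.1 h14.2]
    norm_num [pvSegs, List.mem_cons]
    split_ifs <;> simp_all <;> omega
  · rw [pvBis_15 n h15.1 h15.2]
    norm_num [pvSegs, List.mem_cons]
    split_ifs <;> simp_all <;> omega
  · rw [pvBis_16 n h16.1 h16.2]
    norm_num [pvSegs, List.mem_cons]
    split_ifs <;> simp_all <;> omega
  · rw [pvBis_17 n h17.1 h17.2]
    norm_num [pvSegs, List.mem_cons]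
    split_ifs <;> simp_all <;> omega
  · rw [pvBis_18 n h18]
    norm_num [pvSegs, List.mem_cons]
    split_ifs <;> simp_all <;> omega

-- ===== VERDICT (by name: the statement is the Claim_ definition above) =====
theorem night_weather_summary_py_spec : Claim_equal_night_weather_summary_py := by
  intro codes _
  unfold Spec_night_weather_summary_py night_weather_summary_py night_weather_summary_py_alt
  match codes with
  | none => rfl
  | some [] => rfl
  | some (h :: t) => simpa using label_eq h
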